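-- pv_equiv track=rewrite | github.com/kajtuszd/SPD-lab | lab3/RandomNumberGenerator.py | sumColumn
-- ===== SOURCE A (Python) =====
-- def sumColumn(matrix):
--     answer = []
--     for column in range(len(matrix[0])):
--         t = 0
--         for row in matrix:
--             t += row[column]
--         answer.append(t)
--     return answer
-- ===== SOURCE B (Python) =====
-- def sumColumn(matrix):
--     n = len(matrix[0])
--     answer = [0] * n
--     for row in matrix:
--         answer = [answer[j] + row[j] for j in range(n)]
--     return answer
-- ===== Notes on version B (the rewrite author's own statement) =====
-- stated objective: alternative
-- what changed: B makes a single row-major pass maintaining a vector of all column accumulators at once, instead of A's column-major recomputation with a separate inner scan over all rows for each column.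
import Mathlib
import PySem

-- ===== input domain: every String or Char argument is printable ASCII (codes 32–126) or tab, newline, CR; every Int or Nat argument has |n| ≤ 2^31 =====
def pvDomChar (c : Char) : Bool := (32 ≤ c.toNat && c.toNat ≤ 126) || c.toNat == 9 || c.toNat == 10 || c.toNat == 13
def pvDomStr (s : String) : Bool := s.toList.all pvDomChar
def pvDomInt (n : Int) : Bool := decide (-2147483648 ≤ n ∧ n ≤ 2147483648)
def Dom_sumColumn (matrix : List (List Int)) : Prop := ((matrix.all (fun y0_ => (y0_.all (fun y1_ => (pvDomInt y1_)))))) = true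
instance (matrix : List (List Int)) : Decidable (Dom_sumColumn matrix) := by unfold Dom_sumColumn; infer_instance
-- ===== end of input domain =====

-- B sums every column in one row-major pass over a vector of accumulators, instead of
-- A's column-major loop that rescans all rows once per column (alternative decomposition).

-- ===== PORT A =====
-- A, step for step: for column in range(len(matrix[0])): t = 0; for row in matrix: t += row[column]; answer.append(t).
-- Pre_ guarantees matrix ≠ [] (so matrix[0] is headD []) and every row[column] access is in range (pyGetD default never used).
def sumColumn (matrix : List (List Int)) : List Int :=
  (PySem.List.pyRange 0 ((matrix.headD []).length : Int) 1).foldl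
    (fun answer column =>
      answer ++ [matrix.foldl (fun t row => t + PySem.List.pyGetD row column 0) 0])
    []

-- ===== PORT B =====
-- B, step for step: n = len(matrix[0]); answer = [0]*n; for row: answer = [answer[j] + row[j] for j in range(n)].
-- Indices j come from range(n), so pyGetD's default is never used under Pre_.
def sumColumn_alt (matrix : List (List Int)) : List Int :=
  let n : Nat := (matrix.headD []).length
  matrix.foldl
    (fun answer row =>
      (PySem.List.pyRange 0 (n : Int) 1).map
        (fun j => PySem.List.pyGetD answer j 0 + PySem.List.pyGetD row j 0))
    (List.replicate n 0)

-- ===== PRECONDITION & SPEC =====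
-- Pre_ excludes exactly the inputs where Python A raises IndexError: the empty matrix
-- (matrix[0]) and ragged matrices where some row is shorter than the first row (row[column]).
def Pre_sumColumn (matrix : List (List Int)) : Prop :=
  matrix ≠ [] ∧ ∀ row ∈ matrix, (matrix.headD []).length ≤ row.length
instance (matrix : List (List Int)) : Decidable (Pre_sumColumn matrix) := by
  unfold Pre_sumColumn; infer_instance

def pvWitness_sumColumn : List (List Int) := [[1, 2], [3, 4], [5, -6]]

def Spec_sumColumn (matrix : List (List Int)) (out : List Int) : Prop := out = sumColumn_alt matrix
instance (matrix : List (List Int)) (out : List Int) : Decidable (Spec_sumColumn matrix out) := by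
  unfold Spec_sumColumn; infer_instance

-- ===== CLAIM (what is proved, stated in full; the proofs are below) =====
def Claim_equal_sumColumn : Prop :=
  ∀ (matrix : List (List Int)), Dom_sumColumn matrix → Pre_sumColumn matrix →
    Spec_sumColumn matrix (sumColumn matrix)

-- ===== LEMMAS AND PROOFS =====

-- column sum as a map-sum, extracted from A's inner loop
theorem pv_foldl_add_col (matrix : List (List Int)) (c : Int) :
    matrix.foldl (fun t row => t + PySem.List.pyGetD row c 0) 0
      = (matrix.map (fun row => PySem.List.pyGetD row c 0)).sum := by
  simpa using PySem.List.foldl_add (l := matrix) (g := fun row => PySem.List.pyGetD row c 0) (a := 0)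

-- A's outer loop is a map over the column range
theorem pv_A_eq_map (matrix : List (List Int)) :
    sumColumn matrix
      = (PySem.List.pyRange 0 ((matrix.headD []).length : Int) 1).map
          (fun c => (matrix.map (fun row => PySem.List.pyGetD row c 0)).sum) := by
  unfold sumColumn
  rw [PySem.List.foldl_append_singleton_eq_map]
  simp [pv_foldl_add_col]

-- B's loop invariant: the accumulator vector holds, per column, its old value plus the
-- column sums of the rows processed so far.
theorem pv_B_invariant (n : Nat) (matrix : List (List Int)) (acc : List Int)
    (hlen : acc.length = n) :
    matrix.foldl
      (fun answer row =>
        (PySem.List.pyRange 0 (n : Int) 1).map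
          (fun j => PySem.List.pyGetD answer j 0 + PySem.List.pyGetD row j 0))
      acc
      = (PySem.List.pyRange 0 (n : Int) 1).map
          (fun j => PySem.List.pyGetD acc j 0
                    + (matrix.map (fun row => PySem.List.pyGetD row j 0)).sum) := by
  induction matrix generalizing acc with
  | nil =>
      simp only [List.foldl_nil, List.map_nil, List.sum_nil, add_zero]
      subst hlen
      exact (PySem.List.map_pyGetD_pyRange_zero (xs := acc) (d := 0)).symm
  | cons row rest ih =>
      simp only [List.foldl_cons]
      rw [ih _ (by simp [PySem.List.length_pyRange_one])]
      apply List.map_congr_left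
      intro j hj
      have hjr := (PySem.List.mem_pyRange_one).1 hj
      rw [PySem.List.pyGetD_map_pyRange_of_nonneg _ (n : Int) j 0 hjr.1 hjr.2]
      simp only [List.map_cons, List.sum_cons]
      ring

-- the two ports agree (in fact on every input of the domain)
theorem pv_ports_eq (matrix : List (List Int)) :
    sumColumn matrix = sumColumn_alt matrix := by
  unfold sumColumn_alt
  rw [pv_A_eq_map,
    pv_B_invariant ((matrix.headD []).length) matrix _ (by simp)]
  apply List.map_congr_left
  intro j hj
  have hjr := (PySem.List.mem_pyRange_one).1 hj
  have : PySem.List.pyGetD (List.replicate (matrix.headD []).length (0 : Int)) j 0 = 0 := by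
    rcases Int.eq_ofNat_of_zero_le hjr.1 with ⟨k, rfl⟩
    simp [PySem.List.pyGetD_natCast, List.getD]
  rw [this, zero_add]

-- ===== VERDICT (by name: the statement is the Claim_ definition above) =====
theorem sumColumn_spec : Claim_equal_sumColumn := by
  intro matrix _ _
  exact pv_ports_eq matrix
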